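-- pv_equiv track=rewrite | github.com/SuyeonChoi/Algorithms | CodingTest/[kakao2020]blind_1.py | solution
-- ===== SOURCE A (Python) =====
-- def solution(new_id):
--     #step1
--     id = list(new_id.lower())
--
--     #step2
--     i = 0
--     while i < len(id):
--         s = id[i]
--         if not s.isalpha() and not s.isnumeric() and s not in ['-', '_', '.']:
--             id.pop(i)
--             continue
--         i += 1
--
--     #step3
--     i = 1
--     while i < len(id):
--         s = id[i]
--         if id[i] == '.' and id[i-1] == '.':
--             id.pop(i-1)
--             continue
--         i += 1
--
--     # step4
--     if id[0] == '.':
--         id.pop(0)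
--     if id and id[-1] == '.':
--         id.pop()
--
--     # step5
--     if len(id) == 0:
--         id.append('a')
--     # step6
--     if len(id) >= 16:
--         id = id[:15]
--         if id[-1] == '.':
--             id.pop()
--
--     # step7
--     if len(id) <= 2:
--         last = id[-1]
--         expand = [last*(3-len(id))]
--         id = id + expand
--     return ''.join(id)
-- ===== SOURCE B (Python) =====
-- def solution(new_id):
--     # step1+2: lowercase then keep only allowed characters
--     s = ''.join(c for c in new_id.lower()
--                 if c.isalpha() or c.isnumeric() or c in '-_.')
--     # steps 3+4 in one segment pass: drop empty dot-separated segments,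
--     # which collapses dot runs and removes leading/trailing dots at once
--     s = '.'.join(part for part in s.split('.') if part)
--     # step5
--     if not s:
--         s = 'a'
--     # step6
--     if len(s) >= 16:
--         s = s[:15]
--         if s[-1] == '.':
--             s = s[:-1]
--     # step7
--     if len(s) <= 2:
--         s += s[-1] * (3 - len(s))
--     return s
-- ===== Notes on version B (the rewrite author's own statement) =====
-- stated objective: faster
-- what changed: A's two index-walking pop loops (collapse consecutive dots, then strip a leading and a trailing dot) are replaced by one segment pass: split the string at dots, drop the empty segments, re-join with a dot separator; the character filter and steps 5-7 stay straight string operations.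
import Mathlib
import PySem

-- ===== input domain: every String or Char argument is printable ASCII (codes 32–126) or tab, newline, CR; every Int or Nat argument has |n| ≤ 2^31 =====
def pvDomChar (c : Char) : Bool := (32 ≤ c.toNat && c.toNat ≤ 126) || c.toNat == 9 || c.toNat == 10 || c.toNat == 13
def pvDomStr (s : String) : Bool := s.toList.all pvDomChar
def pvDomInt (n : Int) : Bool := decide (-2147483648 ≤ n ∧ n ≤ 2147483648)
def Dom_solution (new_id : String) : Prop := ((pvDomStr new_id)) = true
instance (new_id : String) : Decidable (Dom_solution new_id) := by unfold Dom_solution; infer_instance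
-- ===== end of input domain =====

-- B replaces A's two quadratic index-walking pop loops (collapse dot runs, strip edge dots)
-- by one linear split/drop-empty/join pass over the dot-separated segments; same return value on Pre_.

-- shared character predicate: the filter condition both Pythons use.
-- s.isnumeric() coincides with s.isdigit() on the printable-ASCII domain Dom_solution.
def pyAllowed (c : Char) : Bool :=
  PySem.Chars.strIsalpha [c] || PySem.Chars.strIsdigit [c] || (c == '-' || c == '_' || c == '.')

-- ===== PORT A =====
-- step2 while loop: pop disallowed chars, walking index i
def solutionStep2 (id : List Char) (i : Nat) : List Char :=
  if h : i < id.length then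
    let s := id[i]
    if !(pyAllowed s) then solutionStep2 (id.eraseIdx i) i
    else solutionStep2 id (i + 1)
  else id
termination_by id.length - i
decreasing_by
  · simp only [List.length_eraseIdx, h, if_true]; omega
  · omega

-- step3 while loop: pop the earlier of two consecutive dots, walking index i
def solutionStep3 (id : List Char) (i : Nat) : List Char :=
  if h : i < id.length then
    if id[i] = '.' ∧ id[i - 1]'(by omega) = '.' then solutionStep3 (id.eraseIdx (i - 1)) i
    else solutionStep3 id (i + 1)
  else id
termination_by id.length - i
decreasing_by
  · have h' : i - 1 < id.length := by omega
    simp only [List.length_eraseIdx, h', if_true]; omega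
  · omega

-- step4 first half: `if id[0] == '.': id.pop(0)` (empty id raises IndexError in Python;
-- those inputs are excluded by Pre_solution, the [] branch is never claimed about)
def dropLeadDot (id : List Char) : List Char :=
  match id with
  | [] => []
  | c :: t => if c = '.' then t else c :: t

-- `if id and id[-1] == '.': id.pop()` (also reused for the identical line in step6)
def dropTailDot (id : List Char) : List Char :=
  if id.getLast? = some '.' then id.dropLast else id

def solution (new_id : String) : String :=
  let id := PySem.Chars.lower new_id.toList          -- step1: list(new_id.lower())
  let id := solutionStep2 id 0                        -- step2
  let id := solutionStep3 id 1                        -- step3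
  let id := dropTailDot (dropLeadDot id)              -- step4
  let id := if id.length = 0 then id ++ ['a'] else id -- step5
  let id := if 16 ≤ id.length then dropTailDot (id.take 15) else id  -- step6: id[:15], strip '.'
  let id := if id.length ≤ 2 then                     -- step7
              match id.getLast? with                  -- last = id[-1] (id nonempty after step5)
              | some last => id ++ List.replicate (3 - id.length) last
              | none => id
            else id
  String.ofList id

-- ===== PORT B =====
def solution_alt (new_id : String) : String :=
  -- step1+2: lowercase, keep allowed chars
  let s := (PySem.Chars.lower new_id.toList).filter pyAllowed
  -- steps 3+4 in one segment pass: '.'.join(part for part in s.split('.') if part)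
  -- (List.splitOn is exact for the one-character separator '.')
  let s := PySem.Chars.join ['.'] ((List.splitOn '.' s).filter (fun p => !p.isEmpty))
  let s := if s = [] then ['a'] else s                -- step5: if not s: s = 'a'
  let s := if 16 ≤ s.length then dropTailDot (s.take 15) else s  -- step6: s[:15], strip '.'
  let s := if s.length ≤ 2 then                       -- step7: s += s[-1]*(3-len(s))
              match s.getLast? with
              | some last => s ++ List.replicate (3 - s.length) last
              | none => s
            else s
  String.ofList s

-- ===== PRECONDITION & SPEC =====
-- Pre_ excludes exactly the inputs on which Python A raises IndexError in step4:
-- strings containing no allowed character (alphanumeric, dash, underscore, dot) at all.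
def Pre_solution (new_id : String) : Prop :=
  (PySem.Chars.lower new_id.toList).any pyAllowed = true
instance (new_id : String) : Decidable (Pre_solution new_id) := by unfold Pre_solution; infer_instance
def pvWitness_solution : String := "a"

def Spec_solution (new_id : String) (out : String) : Prop := out = solution_alt new_id
instance (new_id : String) (out : String) : Decidable (Spec_solution new_id out) := by unfold Spec_solution; infer_instance

-- ===== CLAIM (what is proved, stated in full; the proofs are below) =====
def Claim_equal_solution : Prop := ∀ (new_id : String), Dom_solution new_id → Pre_solution new_id → Spec_solution new_id (solution new_id)

-- ===== LEMMAS AND PROOFS =====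

-- A's step3 loop keeps the last dot of each run; `collapse` is that normal form.
def collapse : List Char → List Char
  | [] => []
  | [c] => [c]
  | a :: b :: t => if a = '.' ∧ b = '.' then collapse (b :: t) else a :: collapse (b :: t)

-- B's `if part` filter, with the first split segment always kept.
def keepF : List (List Char) → List (List Char)
  | [] => []
  | p :: ps => p :: ps.filter (fun q => !q.isEmpty)

theorem step2_eq (id : List Char) (i : Nat) :
    solutionStep2 id i = id.take i ++ (id.drop i).filter pyAllowed := by
  induction id, i using solutionStep2.induct with
  | case1 id i h s hbad ih =>
    rw [solutionStep2, dif_pos h, if_pos hbad, ih, List.eraseIdx_eq_take_drop_succ]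
    have h1 : (id.take i).length = i := List.length_take_of_le (le_of_lt h)
    rw [List.take_left' h1, List.drop_left' h1,
      List.drop_eq_getElem_cons h, List.filter_cons]
    simp only [s] at hbad
    have : pyAllowed id[i] = false := by simpa using hbad
    simp [this]
  | case2 id i h s hgood ih =>
    rw [solutionStep2, dif_pos h, if_neg hgood, ih,
      List.drop_eq_getElem_cons h, List.filter_cons]
    simp only [s] at hgood
    have hg : pyAllowed id[i] = true := by simpa using hgood
    simp only [hg, if_true]
    rw [List.take_add_one, List.getElem?_eq_getElem h]
    simp only [Option.toList_some, List.append_assoc, List.singleton_append]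
  | case3 id i h =>
    rw [solutionStep2, dif_neg h]
    rw [List.drop_eq_nil_of_le (by omega), List.filter_nil, List.append_nil,
      List.take_of_length_le (by omega)]

theorem step3_eq (id : List Char) (i : Nat) :
    1 ≤ i → solutionStep3 id i = id.take (i - 1) ++ collapse (id.drop (i - 1)) := by
  induction id, i using solutionStep3.induct with
  | case1 id i h hdots ih =>
    intro hi
    have hi1 : i - 1 < id.length := by omega
    have hsucc : i - 1 + 1 = i := by omega
    rw [solutionStep3, dif_pos h, if_pos hdots, ih hi, List.eraseIdx_eq_take_drop_succ]
    have h1 : (id.take (i-1)).length = i - 1 := List.length_take_of_le (le_of_lt hi1)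
    rw [List.take_left' h1, List.drop_left' h1, hsucc]
    congr 1
    have e1 : id.drop (i-1) = id[i-1] :: id.drop i := by
      rw [List.drop_eq_getElem_cons hi1, hsucc]
    have e2 : id.drop i = id[i] :: id.drop (i+1) := List.drop_eq_getElem_cons h
    rw [e1, hdots.2, e2, hdots.1]
    simp [collapse]
  | case2 id i h hdots ih =>
    intro hi
    have hi1 : i - 1 < id.length := by omega
    have hsucc : i - 1 + 1 = i := by omega
    rw [solutionStep3, dif_pos h, if_neg hdots, ih (by omega)]
    simp only [Nat.add_sub_cancel]
    have e1 : id.drop (i-1) = id[i-1] :: id.drop i := by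
      rw [List.drop_eq_getElem_cons hi1, hsucc]
    have e2 : id.drop i = id[i] :: id.drop (i+1) := List.drop_eq_getElem_cons h
    have e3 : id.take i = id.take (i-1) ++ [id[i-1]] := by
      conv_lhs => rw [← hsucc]
      rw [List.take_add_one, List.getElem?_eq_getElem hi1]
      simp
    have hnd : ¬(id[i-1] = '.' ∧ id[i] = '.') := fun hx => hdots ⟨hx.2, hx.1⟩
    rw [e1, e2]
    simp only [collapse, if_neg hnd]
    rw [e3, List.append_assoc, List.singleton_append]
  | case3 id i h =>
    intro hi
    cases hlt : id.drop (i-1) with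
    | nil =>
      rw [solutionStep3, dif_neg h, collapse, List.append_nil]
      have := List.take_append_drop (i-1) id
      rw [hlt, List.append_nil] at this; exact this.symm
    | cons c t =>
      have hlen : (id.drop (i-1)).length ≤ 1 := by
        rw [List.length_drop]; omega
      rw [hlt] at hlen; simp at hlen
      subst hlen
      rw [solutionStep3, dif_neg h]
      have hid : id.take (i-1) ++ [c] = id := by
        have h0 := List.take_append_drop (i-1) id
        rw [hlt] at h0; exact h0
      simp only [collapse]
      exact hid.symm

theorem collapse_ne_nil (t : List Char) (h : t ≠ []) : collapse t ≠ [] := by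
  induction t using collapse.induct with
  | case1 => simp at h
  | case2 c => simp [collapse]
  | case3 a b t hd ih => simp only [collapse, if_pos hd]; exact ih (by simp)
  | case4 a b t hd ih => simp [collapse, hd]

theorem dropTailDot_cons (c : Char) (xs : List Char) (h : xs ≠ []) :
    dropTailDot (c :: xs) = c :: dropTailDot xs := by
  cases xs with
  | nil => simp at h
  | cons y ys =>
    unfold dropTailDot
    rw [List.getLast?_cons_cons, List.dropLast_cons_of_ne_nil (by simp)]
    split_ifs <;> rfl

theorem splitOnP_ne_nil (p : Char → Bool) (t : List Char) : List.splitOnP p t ≠ [] := by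
  induction t with
  | nil => simp [List.splitOnP_nil]
  | cons a t ih =>
    rw [List.splitOnP_cons]
    split_ifs
    · simp
    · cases hs : List.splitOnP p t with
      | nil => exact absurd hs ih
      | cons q qs => simp

theorem join_cons_head (sep : List Char) (a : Char) (p : List Char) (qs : List (List Char)) :
    PySem.Chars.join sep ((a :: p) :: qs) = a :: PySem.Chars.join sep (p :: qs) := by
  cases qs with
  | nil => simp [PySem.Chars.join_singleton]
  | cons q qs => rw [PySem.Chars.join_cons_cons, PySem.Chars.join_cons_cons]; simp

theorem splitOn_eq (t : List Char) : List.splitOn '.' t = List.splitOnP (· == '.') t := rfl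


theorem splitOn_cons (c : Char) (t : List Char) :
    List.splitOn '.' (c :: t) =
      if c = '.' then [] :: List.splitOn '.' t
      else (List.splitOn '.' t).modifyHead (c :: ·) := by
  rw [splitOn_eq, List.splitOnP_cons]
  simp [splitOn_eq]

theorem splitOn_ne_nil (t : List Char) : List.splitOn '.' t ≠ [] := splitOnP_ne_nil _ t

theorem keepF_eq_filter (x : List Char) (ps : List (List Char)) (h : x ≠ []) :
    keepF (x :: ps) = (x :: ps).filter (fun q => !q.isEmpty) := by
  cases x with
  | nil => simp at h
  | cons y ys => simp [keepF, List.filter]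

theorem keep_core (t : List Char) :
    dropTailDot (collapse t) = PySem.Chars.join ['.'] (keepF (List.splitOn '.' t)) := by
  induction t using collapse.induct with
  | case1 => simp [collapse, dropTailDot, keepF, PySem.Chars.join_singleton]
  | case2 c =>
    by_cases hc : c = '.'
    · subst hc; simp [collapse, dropTailDot, splitOn_cons, keepF,
        PySem.Chars.join_singleton]
    · simp [collapse, dropTailDot, splitOn_cons, hc, keepF,
        PySem.Chars.join_singleton]
  | case3 a b t hd ih =>
    obtain ⟨ha, hb⟩ := hd
    subst ha; subst hb
    rw [show collapse ('.' :: '.' :: t) = collapse ('.' :: t) by simp [collapse]]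
    rw [ih, splitOn_cons '.' ('.' :: t), if_pos rfl, splitOn_cons '.' t, if_pos rfl]
    simp [keepF, List.filter]
  | case4 a b t hd ih =>
    rw [show collapse (a :: b :: t) = a :: collapse (b :: t) by simp [collapse, hd]]
    rw [dropTailDot_cons a _ (collapse_ne_nil _ (by simp)), ih]
    by_cases ha : a = '.'
    · subst ha
      have hb : b ≠ '.' := by rintro rfl; exact hd ⟨rfl, rfl⟩
      obtain ⟨p, ps, hps⟩ : ∃ p ps, List.splitOn '.' t = p :: ps := by
        cases hs : List.splitOn '.' t with
        | nil => exact absurd hs (splitOn_ne_nil t)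
        | cons p ps => exact ⟨p, ps, rfl⟩
      rw [splitOn_cons '.' (b :: t), if_pos rfl, splitOn_cons b t, if_neg hb, hps,
        List.modifyHead_cons]
      simp [keepF, List.filter, PySem.Chars.join_cons_cons]
    · obtain ⟨p, ps, hps⟩ : ∃ p ps, List.splitOn '.' (b :: t) = p :: ps := by
        cases hs : List.splitOn '.' (b :: t) with
        | nil => exact absurd hs (splitOn_ne_nil _)
        | cons p ps => exact ⟨p, ps, rfl⟩
      rw [splitOn_cons a, if_neg ha, hps, List.modifyHead_cons]
      simp only [keepF]
      rw [join_cons_head]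

theorem strip_core (t : List Char) :
    dropTailDot (dropLeadDot (collapse t)) =
      PySem.Chars.join ['.'] ((List.splitOn '.' t).filter (fun p => !p.isEmpty)) := by
  induction t using collapse.induct with
  | case1 => simp [collapse, dropLeadDot, dropTailDot, PySem.Chars.join_nil]
  | case2 c =>
    by_cases hc : c = '.'
    · subst hc
      simp [collapse, dropLeadDot, dropTailDot, splitOn_cons,
        PySem.Chars.join_nil, List.filter]
    · simp [collapse, dropLeadDot, dropTailDot, hc, splitOn_cons,
        PySem.Chars.join_singleton, List.filter]
  | case3 a b t hd ih =>
    obtain ⟨ha, hb⟩ := hd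
    subst ha; subst hb
    rw [show collapse ('.' :: '.' :: t) = collapse ('.' :: t) by simp [collapse]]
    rw [ih, splitOn_cons '.' ('.' :: t), if_pos rfl]
    simp [List.filter]
  | case4 a b t hd ih =>
    rw [show collapse (a :: b :: t) = a :: collapse (b :: t) by simp [collapse, hd]]
    by_cases ha : a = '.'
    · subst ha
      have hb : b ≠ '.' := by rintro rfl; exact hd ⟨rfl, rfl⟩
      obtain ⟨p, ps, hps⟩ : ∃ p ps, List.splitOn '.' t = p :: ps := by
        cases hs : List.splitOn '.' t with
        | nil => exact absurd hs (splitOn_ne_nil t)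
        | cons p ps => exact ⟨p, ps, rfl⟩
      rw [show dropLeadDot ('.' :: collapse (b :: t)) = collapse (b :: t) by
            simp [dropLeadDot]]
      rw [keep_core (b :: t), splitOn_cons '.' (b :: t), if_pos rfl,
        splitOn_cons b t, if_neg hb, hps, List.modifyHead_cons,
        keepF_eq_filter _ _ (by simp)]
      simp [List.filter]
    · rw [show dropLeadDot (a :: collapse (b :: t)) = a :: collapse (b :: t) by
            simp [dropLeadDot, ha]]
      rw [show (a :: collapse (b :: t)) = collapse (a :: b :: t) by simp [collapse, hd]]
      rw [keep_core (a :: b :: t)]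
      obtain ⟨p, ps, hps⟩ : ∃ p ps, List.splitOn '.' (b :: t) = p :: ps := by
        cases hs : List.splitOn '.' (b :: t) with
        | nil => exact absurd hs (splitOn_ne_nil _)
        | cons p ps => exact ⟨p, ps, rfl⟩
      rw [splitOn_cons a, if_neg ha, hps, List.modifyHead_cons,
        keepF_eq_filter _ _ (by simp)]

theorem main_eq (new_id : String) : solution new_id = solution_alt new_id := by
  simp only [solution, solution_alt]
  rw [step2_eq, step3_eq _ 1 le_rfl]
  simp only [List.take_zero, List.drop_zero, List.nil_append, Nat.sub_self]
  rw [strip_core]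
  generalize (PySem.Chars.join ['.']
    ((List.splitOn '.' ((PySem.Chars.lower new_id.toList).filter pyAllowed)).filter
      (fun p => !p.isEmpty))) = j
  by_cases hj : j = []
  · subst hj; rfl
  · have : ¬ j.length = 0 := by simpa using hj
    simp only [if_neg this, if_neg hj]

-- ===== VERDICT (by name: the statement is the Claim_ definition above) =====
theorem solution_spec : Claim_equal_solution := by
  intro new_id _ _
  unfold Spec_solution
  exact main_eq new_id
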